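-- pv_equiv track=rewrite | github.com/jounger/leetcode | src/36.py | is_duplicated
-- ===== SOURCE A (Python) =====
-- def is_duplicated(nums):
--     hashset = set()
--     for num in nums:
--         if num == ".":
--             continue
--         if num in hashset:
--             return True
--         hashset.add(num)
-- ===== SOURCE B (Python) =====
-- def is_duplicated(nums):
--     s = sorted(n for n in nums if n != ".")
--     for prev, cur in zip(s, s[1:]):
--         if prev == cur:
--             return True
-- ===== Notes on version B (the rewrite author's own statement) =====
-- stated objective: alternative
-- what changed: Replaces A's hash-set membership loop by sort-then-scan: sort the non-'.' elements and look for an equal adjacent pair, which exists iff there is a duplicate.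
import Mathlib
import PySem

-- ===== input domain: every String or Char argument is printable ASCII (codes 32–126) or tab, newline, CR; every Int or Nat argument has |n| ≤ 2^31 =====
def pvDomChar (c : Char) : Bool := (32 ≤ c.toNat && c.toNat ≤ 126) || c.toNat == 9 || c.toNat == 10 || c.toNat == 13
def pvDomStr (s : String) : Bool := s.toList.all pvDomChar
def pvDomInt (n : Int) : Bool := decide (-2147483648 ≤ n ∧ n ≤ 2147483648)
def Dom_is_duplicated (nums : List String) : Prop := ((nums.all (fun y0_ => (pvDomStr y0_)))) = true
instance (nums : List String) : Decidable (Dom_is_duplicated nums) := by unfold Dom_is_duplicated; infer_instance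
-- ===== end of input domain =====

-- B replaces A's hash-set membership loop by sort-then-adjacent-scan; return value only.

-- ===== PORT A =====
-- the loop of A: carries the growing hashset, returns early on a repeat, none when it falls off
def isDupGo (hashset : PySem.Set String) : List String → Option Bool
  | [] => none
  | num :: rest =>
    if num = "." then isDupGo hashset rest
    else if PySem.Set.contains hashset num then some true
    else isDupGo (PySem.Set.add hashset num) rest

def is_duplicated (nums : List String) : Option Bool :=
  isDupGo PySem.Set.empty nums

-- ===== PORT B =====
-- Source B's loop over zip(s, s[1:]): scan consecutive pairs, early return on an equal pair
def adjScan : List String → Option Bool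
  | prev :: cur :: rest => if prev = cur then some true else adjScan (cur :: rest)
  | _ => none

def is_duplicated_alt (nums : List String) : Option Bool :=
  adjScan (PySem.List.sorted (nums.filter (fun n => n ≠ ".")) (fun x => x) false)

-- ===== PRECONDITION & SPEC =====
def Spec_is_duplicated (nums : List String) (out : Option Bool) : Prop := out = is_duplicated_alt nums
instance (nums : List String) (out : Option Bool) : Decidable (Spec_is_duplicated nums out) := by unfold Spec_is_duplicated; infer_instance

-- ===== CLAIM (what is proved, stated in full; the proofs are below) =====
def Claim_equal_is_duplicated : Prop := ∀ (nums : List String), Dom_is_duplicated nums → Spec_is_duplicated nums (is_duplicated nums)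

-- ===== LEMMAS AND PROOFS =====

-- A's loop answers: "is hashset ++ (filtered rest) duplicate-free?"
theorem isDupGo_eq (xs : List String) : ∀ (s : PySem.Set String), s.Nodup →
    isDupGo s xs = if (s ++ xs.filter (fun n => n ≠ ".")).Nodup then none else some true := by
  induction xs with
  | nil => intro s hs; simp [isDupGo, hs]
  | cons x xs ih =>
    intro s hs
    by_cases hx : x = "."
    · simpa [isDupGo, hx] using ih s hs
    · by_cases hmem : x ∈ s
      · have hnd : ¬ (s ++ (x :: xs).filter (fun n => n ≠ ".")).Nodup := by
          intro hnd
          have := List.disjoint_of_nodup_append hnd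
          exact this hmem (by simp [hx])
        rw [isDupGo]
        rw [if_neg hx, if_pos ((PySem.Set.contains_iff s x).2 hmem)]
        simp only [List.filter_cons] at hnd ⊢
        exact (if_neg hnd).symm
      · have hcon : PySem.Set.contains s x = false := by
          by_contra h
          exact hmem ((PySem.Set.contains_iff s x).1 (by simpa using h))
        have hadd : PySem.Set.add s x = s ++ [x] := PySem.Set.add_of_not_mem hmem
        have hnd2 : (PySem.Set.add s x).Nodup := PySem.Set.nodup_add s x hs
        have := ih (PySem.Set.add s x) hnd2
        rw [isDupGo, if_neg hx, hcon]
        simp only [Bool.false_eq_true, if_false]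
        rw [this, hadd, List.append_assoc]
        simp [hx]

-- on a ≤-sorted list, the adjacent scan finds an equal pair iff the list has a duplicate
theorem adjScan_eq (xs : List String) (h : xs.Pairwise (· ≤ ·)) :
    adjScan xs = if xs.Nodup then none else some true := by
  induction xs with
  | nil => simp [adjScan]
  | cons a t ih =>
    match t, h with
    | [], _ => simp [adjScan]
    | b :: t, h =>
      have hab : a ≤ b := (List.pairwise_cons.1 h).1 b (by simp)
      have ht : (b :: t).Pairwise (· ≤ ·) := (List.pairwise_cons.1 h).2
      by_cases he : a = b
      · have : ¬ (a :: b :: t).Nodup := by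
          intro hn; exact (List.nodup_cons.1 hn).1 (by simp [he])
        simp [adjScan, he]
      · have hnm : a ∉ b :: t := by
          intro hm
          rcases List.mem_cons.1 hm with h1 | h2
          · exact he h1
          · have hba : b ≤ a := (List.pairwise_cons.1 ht).1 a h2
            exact he (le_antisymm hab hba)
        rw [adjScan, if_neg he, ih ht]
        by_cases hn : (b :: t).Nodup
        · rw [if_pos hn, if_pos (List.nodup_cons.2 ⟨hnm, hn⟩)]
        · rw [if_neg hn, if_neg (fun hc => hn (List.nodup_cons.1 hc).2)]

-- ===== VERDICT (by name: the statement is the Claim_ definition above) =====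
theorem is_duplicated_spec : Claim_equal_is_duplicated := by
  intro nums _
  unfold Spec_is_duplicated is_duplicated is_duplicated_alt
  rw [isDupGo_eq nums PySem.Set.empty List.nodup_nil]
  simp only [PySem.Set.empty, List.nil_append]
  set f := nums.filter (fun n => n ≠ ".") with hf
  rw [adjScan_eq _ (by simpa using PySem.List.sorted_pairwise f (fun x => x))]
  simp only [(PySem.List.sorted_perm f (fun x => x) false).nodup_iff]
  rfl
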